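-- pv_equiv track=rewrite | github.com/naetherm/ocr_dataset | texparser/texparser/texmacroexpander/__init__.py | _nested_brackets
-- ===== SOURCE A (Python) =====
-- def _nested_brackets(level=5):
--   reg = r"(?:[^\r\n\{\}]|\\\[\{\}]|\r?\n(?!\r?\n))*?"
--   c = r"(?:[^\r\n\{\}]|\\\[\{\}]|\r?\n(?!\r?\n))*?"
--
--   lvl = level
--
--   while lvl > 0:
--     reg = c + r"(?:\{" + reg + r"\}" + c + r")*?"
--     lvl -= 1
--   return r" *(\{" + reg + r"\}|[^\{])"
-- ===== SOURCE B (Python) =====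
-- def _nested_brackets(level=5):
--   c = r"(?:[^\r\n\{\}]|\\\[\{\}]|\r?\n(?!\r?\n))*?"
--   pre = c + r"(?:\{"
--   suf = r"\}" + c + r")*?"
--   n = max(level, 0)
--   return r" *(\{" + pre * n + c + suf * n + r"\}|[^\{])"
-- ===== Notes on version B (the rewrite author's own statement) =====
-- stated objective: faster
-- what changed: Replaced the while loop that rebuilds the growing regex string each iteration with the telescoped closed form prefix*level + c + suffix*level computed by string repetition.
import Mathlib
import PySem

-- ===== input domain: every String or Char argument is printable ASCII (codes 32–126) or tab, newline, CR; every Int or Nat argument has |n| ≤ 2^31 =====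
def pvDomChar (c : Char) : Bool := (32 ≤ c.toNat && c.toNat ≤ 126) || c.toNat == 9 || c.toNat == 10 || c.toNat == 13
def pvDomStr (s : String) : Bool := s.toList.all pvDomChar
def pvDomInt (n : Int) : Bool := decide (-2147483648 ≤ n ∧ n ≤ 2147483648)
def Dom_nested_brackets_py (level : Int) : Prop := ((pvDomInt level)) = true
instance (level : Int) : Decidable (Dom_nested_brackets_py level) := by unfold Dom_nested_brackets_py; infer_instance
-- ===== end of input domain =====

-- B replaces A's iterative regex wrapping by the telescoped closed form built with string repetition (objective: faster; loop rebuilds the string each pass, repetition builds it once).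

-- ===== PORT A =====
-- the inner token regex (Python raw string, backslashes literal)
def nbC : String := "(?:[^\\r\\n\\{\\}]|\\\\\\[\\{\\}]|\\r?\\n(?!\\r?\\n))*?"

-- A's while loop: wrap reg once per remaining positive lvl
def nbLoop (lvl : Int) (reg : String) : String :=
  if lvl > 0 then nbLoop (lvl - 1) (nbC ++ "(?:\\{" ++ reg ++ "\\}" ++ nbC ++ ")*?")
  else reg
termination_by lvl.toNat
decreasing_by omega

def nested_brackets_py (level : Int) : String :=
  " *(\\{" ++ nbLoop level nbC ++ "\\}|[^\\{])"

-- ===== PORT B =====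
-- s * n (Python string repetition; n clamped at 0 as in Python)
def nbRep (s : String) (n : Nat) : String := String.join (List.replicate n s)

def nested_brackets_py_alt (level : Int) : String :=
  " *(\\{" ++ nbRep (nbC ++ "(?:\\{") (max level 0).toNat ++ nbC
    ++ nbRep ("\\}" ++ nbC ++ ")*?") (max level 0).toNat ++ "\\}|[^\\{])"

-- ===== PRECONDITION & SPEC =====
def Spec_nested_brackets_py (level : Int) (out : String) : Prop := out = nested_brackets_py_alt level
instance (level : Int) (out : String) : Decidable (Spec_nested_brackets_py level out) := by unfold Spec_nested_brackets_py; infer_instance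

-- ===== CLAIM (what is proved, stated in full; the proofs are below) =====
def Claim_equal_nested_brackets_py : Prop := ∀ (level : Int), Dom_nested_brackets_py level → Spec_nested_brackets_py level (nested_brackets_py level)

-- ===== LEMMAS AND PROOFS =====
theorem nbLoop_nonpos (lvl : Int) (reg : String) (h : ¬ lvl > 0) : nbLoop lvl reg = reg := by
  unfold nbLoop; simp [h]

theorem nbRep_zero (s : String) : nbRep s 0 = "" := rfl

theorem nbFoldl (l : List String) (a : String) :
    l.foldl (fun r t => r ++ t) a = a ++ l.foldl (fun r t => r ++ t) "" := by
  induction l generalizing a with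
  | nil => simp [List.foldl]
  | cons x xs ih =>
      simp only [List.foldl]
      rw [ih (a ++ x), ih (("" : String) ++ x)]
      simp [String.append_assoc]

theorem nbRep_succ (s : String) (n : Nat) : nbRep s (n + 1) = s ++ nbRep s n := by
  have h := nbFoldl (List.replicate n s) s
  simp only [nbRep, List.replicate_succ, String.join, List.foldl]
  simpa using h

theorem nbRep_succ' (s : String) (n : Nat) : nbRep s (n + 1) = nbRep s n ++ s := by
  induction n with
  | zero => simp [nbRep, String.join]
  | succ k ih =>
      rw [nbRep_succ s (k+1), ih, ← String.append_assoc, ← nbRep_succ, ih]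

theorem nbLoop_closed (n : Nat) (reg : String) :
    nbLoop (n : Int) reg
      = nbRep (nbC ++ "(?:\\{") n ++ reg ++ nbRep ("\\}" ++ nbC ++ ")*?") n := by
  induction n generalizing reg with
  | zero => simp [nbLoop, nbRep_zero]
  | succ k ih =>
      rw [show ((k + 1 : Nat) : Int) = (k : Int) + 1 by push_cast; ring]
      rw [nbLoop]
      rw [if_pos (by omega : (k : Int) + 1 > 0)]
      rw [show (k : Int) + 1 - 1 = (k : Int) by ring, ih]
      rw [nbRep_succ' (nbC ++ "(?:\\{") k, nbRep_succ ("\\}" ++ nbC ++ ")*?") k]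
      simp [String.append_assoc]

-- ===== VERDICT (by name: the statement is the Claim_ definition above) =====
theorem nested_brackets_py_spec : Claim_equal_nested_brackets_py := by
  intro level _
  unfold Spec_nested_brackets_py nested_brackets_py nested_brackets_py_alt
  by_cases h : level > 0
  · have hn : ((level.toNat : Int)) = level := by omega
    have hm : (max level 0).toNat = level.toNat := by omega
    have hc := nbLoop_closed level.toNat nbC
    rw [hn] at hc
    rw [hm, hc]
    simp [String.append_assoc]
  · rw [nbLoop_nonpos _ _ h]
    have h0 : (max level 0).toNat = 0 := by omega
    simp [h0, nbRep_zero]
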